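-- pv_equiv track=rewrite | github.com/pymc-labs/finance_characteristics-repo | data_collection/characteristics.py | _generate_year_chunks
-- ===== SOURCE A (Python) =====
-- def _generate_year_chunks(
--     start_year: int, end_year: int, chunk_size: int = 5
-- ) -> list[tuple[int, int]]:
--     """Generate (start, end) year tuples for chunked processing."""
--     chunks = []
--     current = start_year
--     while current <= end_year:
--         chunk_end = min(current + chunk_size - 1, end_year)
--         chunks.append((current, chunk_end))
--         current = chunk_end + 1
--     return chunks
-- ===== SOURCE B (Python) =====
-- def _generate_year_chunks(
--     start_year: int, end_year: int, chunk_size: int = 5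
-- ) -> list[tuple[int, int]]:
--     """Generate (start, end) year tuples for chunked processing."""
--     boundaries = list(range(start_year, end_year + 1, chunk_size))
--     boundaries.append(end_year + 1)
--     return [(lo, hi - 1) for lo, hi in zip(boundaries, boundaries[1:])]
-- ===== Notes on version B (the rewrite author's own statement) =====
-- stated objective: alternative
-- what changed: B builds the result in two staged passes: it first materialises the list of chunk boundaries (range(start_year, end_year+1, chunk_size) plus the sentinel end_year+1) and then pairs consecutive boundaries with zip, so each chunk end is the next boundary minus one - there is no min(), no per-chunk end computation, and no current accumulator threaded through a loop.
-- outside the precondition, e.g. on _generate_year_chunks(5, 3, 0): A returns [], B raises ValueError; on _generate_year_chunks(5, 3, -1): A returns [], B returns [(5, 3)]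
import Mathlib
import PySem

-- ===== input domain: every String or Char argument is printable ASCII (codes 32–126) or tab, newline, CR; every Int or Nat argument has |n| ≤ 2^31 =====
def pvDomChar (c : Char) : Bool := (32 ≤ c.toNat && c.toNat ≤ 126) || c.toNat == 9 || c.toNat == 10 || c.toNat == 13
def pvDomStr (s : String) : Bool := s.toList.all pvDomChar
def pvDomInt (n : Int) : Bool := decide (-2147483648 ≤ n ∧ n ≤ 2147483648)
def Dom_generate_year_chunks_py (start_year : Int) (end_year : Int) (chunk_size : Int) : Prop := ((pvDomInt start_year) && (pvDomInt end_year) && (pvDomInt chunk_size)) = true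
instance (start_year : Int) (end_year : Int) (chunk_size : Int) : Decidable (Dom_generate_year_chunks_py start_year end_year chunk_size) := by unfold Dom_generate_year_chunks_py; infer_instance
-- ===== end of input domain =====

-- B builds the chunk-boundary list (range plus sentinel end_year+1) and zips
-- consecutive boundaries into chunks, instead of A's while loop threading a
-- `current` accumulator and computing each end with min (alternative; same cost).


-- ===== PORT A =====
-- A's while loop; fuel only totalizes it (under Pre_ the loop makes at most
-- (end_year - start_year + 1) iterations, so the fuel below never runs out)
def pvChunksLoop (end_year chunk_size : Int) : Nat → Int → List (Int × Int) → List (Int × Int)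
  | 0, _, chunks => chunks.reverse
  | fuel + 1, current, chunks =>
    if current ≤ end_year then
      let chunk_end := min (current + chunk_size - 1) end_year
      pvChunksLoop end_year chunk_size fuel (chunk_end + 1) ((current, chunk_end) :: chunks)
    else
      chunks.reverse

def generate_year_chunks_py (start_year : Int) (end_year : Int) (chunk_size : Int) : List (Int × Int) :=
  pvChunksLoop end_year chunk_size ((end_year + 1 - start_year).toNat + 1) start_year []

-- ===== PORT B =====
-- boundaries = list(range(start, end+1, size)); boundaries.append(end+1);
-- [(lo, hi - 1) for lo, hi in zip(boundaries, boundaries[1:])]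
def generate_year_chunks_py_alt (start_year : Int) (end_year : Int) (chunk_size : Int) : List (Int × Int) :=
  let boundaries := PySem.List.pyRange start_year (end_year + 1) chunk_size ++ [end_year + 1]
  (boundaries.zip boundaries.tail).map (fun p => (p.1, p.2 - 1))

-- ===== PRECONDITION & SPEC =====
-- Pre_ restricts to positive chunk_size, the natural domain: for chunk_size ≤ 0 A's
-- while loop never terminates whenever start_year ≤ end_year, and on the remaining
-- corner (end_year < start_year, chunk_size ≤ 0) A's [] is an accident of the loop
-- guard while B raises (chunk_size = 0) or follows range's negative-step semantics.
def Pre_generate_year_chunks_py (start_year : Int) (end_year : Int) (chunk_size : Int) : Prop :=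
  1 ≤ chunk_size
instance (start_year : Int) (end_year : Int) (chunk_size : Int) : Decidable (Pre_generate_year_chunks_py start_year end_year chunk_size) := by unfold Pre_generate_year_chunks_py; infer_instance

def pvWitness_generate_year_chunks_py : Int × Int × Int := (2000, 2013, 5)

def Spec_generate_year_chunks_py (start_year : Int) (end_year : Int) (chunk_size : Int) (out : List (Int × Int)) : Prop := out = generate_year_chunks_py_alt start_year end_year chunk_size
instance (start_year : Int) (end_year : Int) (chunk_size : Int) (out : List (Int × Int)) : Decidable (Spec_generate_year_chunks_py start_year end_year chunk_size out) := by unfold Spec_generate_year_chunks_py; infer_instance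

-- ===== CLAIM (what is proved, stated in full; the proofs are below) =====
def Claim_equal_generate_year_chunks_py : Prop := ∀ (start_year : Int) (end_year : Int) (chunk_size : Int), Dom_generate_year_chunks_py start_year end_year chunk_size → Pre_generate_year_chunks_py start_year end_year chunk_size → Spec_generate_year_chunks_py start_year end_year chunk_size (generate_year_chunks_py start_year end_year chunk_size)

-- ===== LEMMAS AND PROOFS =====

-- proof-only abbreviation for B's zip-of-boundaries body, parametrised by the start
def pvAdj (end_year chunk_size a : Int) : List (Int × Int) :=
  let bs := PySem.List.pyRange a (end_year + 1) chunk_size ++ [end_year + 1]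
  (bs.zip bs.tail).map (fun p => (p.1, p.2 - 1))

theorem pyRange_pos_nil (a b : Int) {s : Int} (hs : 0 < s) (h : b ≤ a) :
    PySem.List.pyRange a b s = [] := by
  rw [PySem.List.pyRange_of_pos a b hs, if_neg (by omega)]
  simp

theorem pyRange_pos_cons (a b : Int) {s : Int} (hs : 0 < s) (h : a < b) :
    PySem.List.pyRange a b s = a :: PySem.List.pyRange (a + s) b s := by
  rw [PySem.List.pyRange_of_pos a b hs, PySem.List.pyRange_of_pos (a + s) b hs]
  have hx : 0 ≤ b - a - 1 := by omega
  have hdiv : (b - a + s - 1) / s = (b - a - 1) / s + 1 := by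
    have := Int.add_mul_ediv_right (b - a - 1) 1 (show s ≠ 0 by omega)
    rw [one_mul] at this
    rw [show b - a + s - 1 = b - a - 1 + s by ring, this]
  have hq : 0 ≤ (b - a - 1) / s := Int.ediv_nonneg hx (by omega)
  rw [if_pos h, hdiv]
  by_cases hc : a + s < b
  · rw [if_pos hc, show b - (a + s) + s - 1 = b - a - 1 by ring]
    rw [show ((b - a - 1) / s + 1).toNat = ((b - a - 1) / s).toNat + 1 by omega]
    rw [List.range_succ_eq_map]
    simp [List.map_map, Function.comp]
    intro k _
    ring
  · have hlt : b - a - 1 < s := by omega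
    have : (b - a - 1) / s = 0 := Int.ediv_eq_zero_of_lt hx hlt
    rw [this, if_neg hc]
    simp

-- B's staged construction satisfies the same one-chunk-at-a-time recurrence as A's loop
theorem pvAdj_step (end_year chunk_size : Int) (hc : 1 ≤ chunk_size) (a : Int) :
    pvAdj end_year chunk_size a =
      if a ≤ end_year then
        (a, min (a + chunk_size - 1) end_year) ::
          pvAdj end_year chunk_size (min (a + chunk_size - 1) end_year + 1)
      else [] := by
  by_cases hle : a ≤ end_year
  · rw [if_pos hle]
    rw [pvAdj, pyRange_pos_cons a (end_year + 1) (by omega) (by omega)]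
    by_cases hfit : a + chunk_size ≤ end_year
    · have hmin : min (a + chunk_size - 1) end_year = a + chunk_size - 1 := by omega
      rw [pyRange_pos_cons (a + chunk_size) (end_year + 1) (by omega) (by omega)]
      rw [hmin]
      have : a + chunk_size - 1 + 1 = a + chunk_size := by omega
      rw [this, pvAdj, pyRange_pos_cons (a + chunk_size) (end_year + 1) (by omega) (by omega)]
      simp [List.zip_cons_cons]
    · have hmin : min (a + chunk_size - 1) end_year = end_year := by omega
      rw [pyRange_pos_nil (a + chunk_size) (end_year + 1) (by omega) (by omega)]
      rw [hmin, pvAdj, pyRange_pos_nil (end_year + 1) (end_year + 1) (by omega) (by omega)]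
      simp
  · rw [if_neg hle, pvAdj, pyRange_pos_nil a (end_year + 1) (by omega) (by omega)]
    simp

theorem pvChunksLoop_eq (end_year chunk_size : Int) (hc : 1 ≤ chunk_size) :
    ∀ (fuel : Nat) (current : Int) (chunks : List (Int × Int)),
      (end_year + 1 - current).toNat ≤ fuel →
      pvChunksLoop end_year chunk_size fuel current chunks =
        chunks.reverse ++ pvAdj end_year chunk_size current := by
  intro fuel
  induction fuel with
  | zero =>
    intro current chunks hfuel
    rw [pvChunksLoop, pvAdj_step end_year chunk_size hc, if_neg (by omega)]
    simp
  | succ fuel ih =>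
    intro current chunks hfuel
    rw [pvChunksLoop, pvAdj_step end_year chunk_size hc]
    by_cases hle : current ≤ end_year
    · rw [if_pos hle, if_pos hle]
      rw [ih (min (current + chunk_size - 1) end_year + 1)
          ((current, min (current + chunk_size - 1) end_year) :: chunks) (by omega)]
      simp
    · rw [if_neg hle, if_neg hle]
      simp

-- ===== VERDICT (by name: the statement is the Claim_ definition above) =====
theorem generate_year_chunks_py_spec : Claim_equal_generate_year_chunks_py := by
  intro start_year end_year chunk_size _hdom hpre
  unfold Spec_generate_year_chunks_py generate_year_chunks_py
  rw [pvChunksLoop_eq end_year chunk_size hpre _ start_year [] (by omega)]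
  rfl
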